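-- pv_equiv track=rewrite | github.com/BennyTMT/GAMETime | tsllm/prompt_utils.py | transform_ts_trends
-- ===== SOURCE A (Python) =====
-- def transform_ts_trends(series):
--     if len(series)>3 :
--         series = series[:-1]
--     trend = []
--     for i in range(1, len(series)):
--         if series[i] > series[i - 1]:
--             trend.append("+")
--         elif series[i] < series[i - 1]:
--             trend.append("-")
--     summarized_trend = []
--     for i in range(len(trend)):
--         if i == 0 or trend[i] != trend[i - 1]:
--             summarized_trend.append(trend[i])
--     return "".join(summarized_trend)
-- ===== SOURCE B (Python) =====
-- def transform_ts_trends(series):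
--     if len(series) > 3:
--         series = series[:-1]
--     res = []
--     n = len(series)
--     i = 0
--     while i + 1 < n:
--         if series[i + 1] > series[i]:
--             res.append("+")
--             # jump over the whole non-decreasing run (equal neighbours extend it)
--             while i + 1 < n and series[i + 1] >= series[i]:
--                 i += 1
--         elif series[i + 1] < series[i]:
--             res.append("-")
--             # jump over the whole non-increasing run
--             while i + 1 < n and series[i + 1] <= series[i]:
--                 i += 1
--         else:
--             i += 1
--     return "".join(res)
-- ===== Notes on version B (the rewrite author's own statement) =====
-- stated objective: alternative
-- what changed: Replaces A's two staged loops (materialise the full pairwise-sign list, then a second dedup pass over it) by a run-compression scan that emits exactly one sign per maximal monotone run and jumps the index over the whole run (equal neighbours extend a run), so no trend list and no last-emitted-sign comparison ever exist.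
import Mathlib
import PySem

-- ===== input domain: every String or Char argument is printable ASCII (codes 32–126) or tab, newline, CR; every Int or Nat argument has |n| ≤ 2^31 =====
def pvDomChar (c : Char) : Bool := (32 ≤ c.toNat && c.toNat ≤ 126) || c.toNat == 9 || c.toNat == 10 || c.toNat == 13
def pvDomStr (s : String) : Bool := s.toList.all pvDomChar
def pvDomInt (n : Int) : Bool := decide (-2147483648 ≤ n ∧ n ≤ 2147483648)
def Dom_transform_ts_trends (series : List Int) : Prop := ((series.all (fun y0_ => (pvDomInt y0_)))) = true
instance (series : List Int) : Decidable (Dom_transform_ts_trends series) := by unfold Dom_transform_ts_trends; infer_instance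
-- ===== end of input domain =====

-- B replaces A's two index loops (build the full pairwise-sign list, then dedup it) by a
-- run-compression recursion emitting one sign per maximal monotone run (objective: alternative).


-- ===== PORT A =====
def transform_ts_trends (series : List Int) : String :=
  let ser := if series.length > 3 then PySem.List.slice series none (some (-1)) else series
  let trend := (PySem.List.pyRange 1 (ser.length : Int) 1).foldl
      (fun acc i =>
        if PySem.List.pyGetD ser i 0 > PySem.List.pyGetD ser (i-1) 0 then acc ++ ["+"]
        else if PySem.List.pyGetD ser i 0 < PySem.List.pyGetD ser (i-1) 0 then acc ++ ["-"]
        else acc) []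
  let summarized := (PySem.List.pyRange 0 (trend.length : Int) 1).foldl
      (fun acc i =>
        if i = 0 ∨ PySem.List.pyGetD trend i "" ≠ PySem.List.pyGetD trend (i-1) "" then
          acc ++ [PySem.List.pyGetD trend i ""]
        else acc) []
  PySem.Str.join "" summarized

-- ===== PORT B =====
-- B's inner while loop: drop elements while the run continues (equal neighbours extend a run)
def skipRun (up : Bool) : List Int → List Int
  | a :: b :: rest => if (if up then b ≥ a else b ≤ a) then skipRun up (b :: rest) else a :: b :: rest
  | s => s

theorem skipRun_length_le (up : Bool) : ∀ (s : List Int), (skipRun up s).length ≤ s.length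
  | [] => le_refl _
  | [_] => le_refl _
  | a :: b :: rest => by
    rw [skipRun]
    by_cases h : (if up then b ≥ a else b ≤ a)
    · rw [if_pos h]
      exact le_trans (skipRun_length_le up (b :: rest)) (by simp)
    · rw [if_neg h]

-- B's outer while loop: the index i advancing through `series` is ported as recursion on
-- the suffix starting at i; one sign is emitted per maximal monotone run, then the inner
-- while (skipRun) jumps over the whole run
def scanB : List Int → List String
  | [] => []
  | [_] => []
  | a :: b :: rest =>
    if b > a then "+" :: scanB (skipRun true (b :: rest))
    else if b < a then "-" :: scanB (skipRun false (b :: rest))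
    else scanB (b :: rest)
termination_by s => s.length
decreasing_by
  · have := skipRun_length_le true (b :: rest); simp at this ⊢; omega
  · have := skipRun_length_le false (b :: rest); simp at this ⊢; omega
  · simp

def transform_ts_trends_alt (series : List Int) : String :=
  PySem.Str.join "" (scanB (if series.length > 3 then PySem.List.slice series none (some (-1)) else series))

-- ===== PRECONDITION & SPEC =====
def Spec_transform_ts_trends (series : List Int) (out : String) : Prop := out = transform_ts_trends_alt series
instance (series : List Int) (out : String) : Decidable (Spec_transform_ts_trends series out) := by unfold Spec_transform_ts_trends; infer_instance

-- ===== CLAIM (what is proved, stated in full; the proofs are below) =====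
def Claim_equal_transform_ts_trends : Prop := ∀ (series : List Int), Dom_transform_ts_trends series → Spec_transform_ts_trends series (transform_ts_trends series)

-- ===== LEMMAS AND PROOFS =====

-- flatten of a binary "gap" function over adjacent pairs
def adjFlat {α β : Type} (g : α → α → List β) : α → List α → List β
  | _, [] => []
  | p, x :: xs => g p x ++ adjFlat g x xs

def gSign (p x : Int) : List String := if x > p then ["+"] else if x < p then ["-"] else []

def gDedup (p x : String) : List String := if x ≠ p then [x] else []

-- dedup-with-last
def dedupEmit : Option String → List String → List String
  | _, [] => []
  | last, x :: xs => if (some x : Option String) ≠ last then x :: dedupEmit (some x) xs else dedupEmit (some x) xs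

theorem adjFoldl {α β : Type} (g : α → α → List β) (d : α) :
    ∀ (s pre : List α) (p : α) (acc : List β),
      (PySem.List.pyRange ((pre.length : Int) + 1) ((pre.length : Int) + 1 + (s.length : Int)) 1).foldl
        (fun acc i => acc ++ g (PySem.List.pyGetD (pre ++ p :: s) (i-1) d) (PySem.List.pyGetD (pre ++ p :: s) i d)) acc
      = acc ++ adjFlat g p s := by
  intro s
  induction s with
  | nil =>
    intro pre p acc
    rw [PySem.List.pyRange_one_eq_nil (by simp)]
    simp [adjFlat]
  | cons x xs ih =>
    intro pre p acc
    rw [PySem.List.pyRange_one_cons (by simp), List.foldl_cons]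
    have e1 : PySem.List.pyGetD (pre ++ p :: x :: xs) ((pre.length : Int) + 1 - 1) d = p := by
      rw [show ((pre.length : Int) + 1 - 1) = (pre.length : Int) by ring]
      simp [PySem.List.pyGetD]
    have e2 : PySem.List.pyGetD (pre ++ p :: x :: xs) ((pre.length : Int) + 1) d = x := by
      simp only [PySem.List.pyGetD]
      rw [show ((pre.length : Int) + 1) = ((pre.length + 1 : Nat) : Int) by push_cast; ring,
        PySem.List.pyGet?_natCast, List.getElem?_append_right (by omega)]
      simp
    rw [e1, e2]
    rw [show (pre.length : Int) + 1 + (((x :: xs).length : Int)) = ((pre ++ [p]).length : Int) + 1 + (xs.length : Int) by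
          simp only [List.length_append, List.length_cons, List.length_nil]; push_cast; ring,
        show (pre.length : Int) + 1 + 1 = ((pre ++ [p]).length : Int) + 1 by
          simp only [List.length_append, List.length_cons, List.length_nil]; push_cast; ring,
        show pre ++ p :: x :: xs = (pre ++ [p]) ++ x :: xs by simp,
        ih (pre ++ [p]) x (acc ++ g p x)]
    simp [adjFlat]

theorem adjFoldl0 {α β : Type} (g : α → α → List β) (d : α) (s : List α) (p : α) (acc : List β) :
    (PySem.List.pyRange 1 (1 + (s.length : Int)) 1).foldl
      (fun acc i => acc ++ g (PySem.List.pyGetD (p :: s) (i-1) d) (PySem.List.pyGetD (p :: s) i d)) acc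
    = acc ++ adjFlat g p s := by
  have h := adjFoldl g d s [] p acc
  simpa using h

theorem loopA1 (p : Int) (s : List Int) :
    (PySem.List.pyRange 1 (((p :: s).length : Int)) 1).foldl
      (fun acc i =>
        if PySem.List.pyGetD (p :: s) i 0 > PySem.List.pyGetD (p :: s) (i-1) 0 then acc ++ ["+"]
        else if PySem.List.pyGetD (p :: s) i 0 < PySem.List.pyGetD (p :: s) (i-1) 0 then acc ++ ["-"]
        else acc) []
    = adjFlat gSign p s := by
  have hf : (fun (acc : List String) (i : Int) =>
        if PySem.List.pyGetD (p :: s) i 0 > PySem.List.pyGetD (p :: s) (i-1) 0 then acc ++ ["+"]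
        else if PySem.List.pyGetD (p :: s) i 0 < PySem.List.pyGetD (p :: s) (i-1) 0 then acc ++ ["-"]
        else acc)
      = (fun acc i => acc ++ gSign (PySem.List.pyGetD (p :: s) (i-1) 0) (PySem.List.pyGetD (p :: s) i 0)) := by
    funext acc i
    simp only [gSign]
    split_ifs <;> simp
  rw [hf, show (((p :: s).length : Int)) = 1 + (s.length : Int) by
      simp only [List.length_cons]; push_cast; ring,
    adjFoldl0 gSign 0 s p []]
  simp

theorem loopA2 (x : String) (xs : List String) :
    (PySem.List.pyRange 0 (((x :: xs).length : Int)) 1).foldl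
      (fun acc i =>
        if i = 0 ∨ PySem.List.pyGetD (x :: xs) i "" ≠ PySem.List.pyGetD (x :: xs) (i-1) "" then
          acc ++ [PySem.List.pyGetD (x :: xs) i ""]
        else acc) []
    = x :: adjFlat gDedup x xs := by
  rw [PySem.List.pyRange_one_cons (by simp), List.foldl_cons]
  rw [if_pos (Or.inl rfl)]
  simp only [PySem.List.pyGetD_zero_cons, List.nil_append]
  have hcg := PySem.List.foldl_congr_mem (PySem.List.pyRange (0 + 1) (((x :: xs).length : Int)) 1)
      (fun (acc : List String) (i : Int) =>
        if i = 0 ∨ PySem.List.pyGetD (x :: xs) i "" ≠ PySem.List.pyGetD (x :: xs) (i-1) "" then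
          acc ++ [PySem.List.pyGetD (x :: xs) i ""]
        else acc)
      (fun (acc : List String) (i : Int) =>
        acc ++ gDedup (PySem.List.pyGetD (x :: xs) (i-1) "") (PySem.List.pyGetD (x :: xs) i "")) [x] (by
    intro acc i hi
    have h1 : (1 : Int) ≤ i := by
      have := (PySem.List.mem_pyRange_one.mp hi).1
      omega
    simp only [gDedup]
    by_cases h : PySem.List.pyGetD (x :: xs) i "" ≠ PySem.List.pyGetD (x :: xs) (i-1) ""
    · rw [if_pos (Or.inr h), if_pos h]
    · have hcond : ¬ (i = 0 ∨ PySem.List.pyGetD (x :: xs) i "" ≠ PySem.List.pyGetD (x :: xs) (i-1) "") := by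
        rintro (h0 | hc)
        · omega
        · exact h hc
      rw [if_neg hcond, if_neg h]
      simp)
  rw [hcg, show (0 : Int) + 1 = 1 by norm_num,
    show (((x :: xs).length : Int)) = 1 + (xs.length : Int) by
      simp only [List.length_cons]; push_cast; ring,
    adjFoldl0 gDedup "" xs x [x]]
  simp

theorem adjFlat_gDedup (xs : List String) : ∀ q, adjFlat gDedup q xs = dedupEmit (some q) xs := by
  induction xs with
  | nil => intro q; rfl
  | cons y ys ih =>
    intro q
    simp only [adjFlat, gDedup, dedupEmit, ih y]
    by_cases h : y = q <;> simp [h]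

-- key lemma: B's run-skip corresponds to dedup-with-last of A's sign list
theorem scanB_skip : ∀ (xs : List Int) (x : Int) (up : Bool),
    scanB (skipRun up (x :: xs))
      = dedupEmit (some (if up then "+" else "-")) (adjFlat gSign x xs) := by
  intro xs
  induction xs with
  | nil =>
    intro x up
    simp [skipRun, scanB, adjFlat, dedupEmit]
  | cons y ys ih =>
    intro x up
    cases up with
    | true =>
      by_cases hge : y ≥ x
      · rw [show skipRun true (x :: y :: ys) = skipRun true (y :: ys) by
            rw [skipRun]; simp [hge]]
        rw [ih y true]
        by_cases hgt : y > x
        · simp [adjFlat, gSign, if_pos hgt, dedupEmit]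
        · have hyx : y = x := le_antisymm (not_lt.mp hgt) hge
          simp [adjFlat, gSign, hyx]
      · have hlt : y < x := not_le.mp hge
        rw [show skipRun true (x :: y :: ys) = x :: y :: ys by
            rw [skipRun]; simp [hge]]
        rw [scanB]
        rw [if_neg (by omega), if_pos hlt, ih y false]
        simp only [adjFlat, gSign, if_neg (by omega : ¬ y > x), if_pos hlt,
          List.singleton_append]
        norm_num [dedupEmit]
        decide
    | false =>
      by_cases hle : y ≤ x
      · rw [show skipRun false (x :: y :: ys) = skipRun false (y :: ys) by
            rw [skipRun]; simp [hle]]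
        rw [ih y false]
        by_cases hlt : y < x
        · simp [adjFlat, gSign, if_neg (by omega : ¬ y > x), if_pos hlt, dedupEmit]
        · have hyx : y = x := le_antisymm hle (not_lt.mp hlt)
          simp [adjFlat, gSign, hyx]
      · have hgt : y > x := not_le.mp hle
        rw [show skipRun false (x :: y :: ys) = x :: y :: ys by
            rw [skipRun]; simp [hle]]
        rw [scanB]
        rw [if_pos hgt, ih y true]
        simp only [adjFlat, gSign, if_pos hgt, List.singleton_append]
        norm_num [dedupEmit]
        decide

theorem scanB_eq : ∀ (s : List Int) (p : Int),
    scanB (p :: s)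
      = (match adjFlat gSign p s with
         | [] => []
         | x :: xs => x :: dedupEmit (some x) xs) := by
  intro s
  induction s with
  | nil =>
    intro p
    simp [scanB, adjFlat]
  | cons b rest ih =>
    intro p
    rw [scanB]
    by_cases hgt : b > p
    · rw [if_pos hgt, scanB_skip rest b true]
      simp [adjFlat, gSign, hgt]
    · rw [if_neg hgt]
      by_cases hlt : b < p
      · rw [if_pos hlt, scanB_skip rest b false]
        simp [adjFlat, gSign, hgt, hlt]
      · rw [if_neg hlt, ih b]
        have hbp : b = p := by omega
        simp [adjFlat, gSign, hbp]

-- ===== VERDICT (by name: the statement is the Claim_ definition above) =====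
theorem transform_ts_trends_spec : Claim_equal_transform_ts_trends := by
  unfold Claim_equal_transform_ts_trends
  intro series _
  unfold Spec_transform_ts_trends
  simp only [transform_ts_trends, transform_ts_trends_alt]
  generalize (if series.length > 3 then PySem.List.slice series none (some (-1)) else series) = ser
  cases ser with
  | nil =>
    rw [show ((([] : List Int)).length : Int) = 0 by simp,
      PySem.List.pyRange_one_eq_nil (by norm_num)]
    simp [scanB, PySem.Str.join, PySem.Chars.join, List.intercalate,
      PySem.List.pyRange_one_eq_nil]
  | cons p s =>
    rw [loopA1 p s, scanB_eq s p]
    cases ht : adjFlat gSign p s with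
    | nil => rfl
    | cons x xs =>
      rw [loopA2 x xs, adjFlat_gDedup xs x]
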